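-- pv_equiv track=rewrite | github.com/JosieMarie0110/device-exposure-command-center | app_last_good.py | build_metrics_html
-- ===== SOURCE A (Python) =====
-- def build_metrics_html(scored_devices):
--     total_assets = len(scored_devices)
--
--     unmanaged_assets = sum(
--         1 for d in scored_devices if d.get("managed", "").lower() == "no"
--     )
--
--     unknown_assets = sum(
--         1
--         for d in scored_devices
--         if d.get("asset_type", "").lower() == "unknown asset"
--         or d.get("owner", "").lower() == "unknown"
--     )
--
--     high_risk_assets = sum(
--         1 for d in scored_devices if d.get("risk_level", "") in ["High", "Critical"]
--     )
--
--     card = """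
--         background:white;
--         border-radius:16px;
--         padding:18px;
--         border:1px solid #d8e6f3;
--         text-align:center;
--         box-shadow:0 2px 8px rgba(0,0,0,0.05);
--     """
--
--     html_output = f"""
--     <div style="display:grid; grid-template-columns:repeat(4,1fr); gap:14px; margin-bottom:14px;">
--         <div style="{card}">
--             <div style="font-size:30px;font-weight:800;color:#174f84;">{total_assets}</div>
--             <div style="font-size:13px;color:#55708d;">Total Assets</div>
--         </div>
--         <div style="{card}">
--             <div style="font-size:30px;font-weight:800;color:#174f84;">{unmanaged_assets}</div>
--             <div style="font-size:13px;color:#55708d;">Unmanaged</div>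
--         </div>
--         <div style="{card}">
--             <div style="font-size:30px;font-weight:800;color:#174f84;">{unknown_assets}</div>
--             <div style="font-size:13px;color:#55708d;">Unknown / Unattributed</div>
--         </div>
--         <div style="{card}">
--             <div style="font-size:30px;font-weight:800;color:#174f84;">{high_risk_assets}</div>
--             <div style="font-size:13px;color:#55708d;">High / Critical Risk</div>
--         </div>
--     </div>
--     """
--     return html_output
-- ===== SOURCE B (Python) =====
-- def _tags(d):
--     tags = []
--     if d.get("managed", "").lower() == "no":
--         tags.append("unmanaged")
--     if (d.get("asset_type", "").lower() == "unknown asset"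
--             or d.get("owner", "").lower() == "unknown"):
--         tags.append("unknown")
--     if d.get("risk_level", "") in ("High", "Critical"):
--         tags.append("high_risk")
--     return tags
--
--
-- def build_metrics_html(scored_devices):
--     # Histogram of classification tags, built once over the flattened tag stream.
--     counts = {}
--     for d in scored_devices:
--         for tag in _tags(d):
--             counts[tag] = counts.get(tag, 0) + 1
--
--     total_assets = len(scored_devices)
--     unmanaged_assets = counts.get("unmanaged", 0)
--     unknown_assets = counts.get("unknown", 0)
--     high_risk_assets = counts.get("high_risk", 0)
--
--     card = """
--         background:white;
--         border-radius:16px;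
--         padding:18px;
--         border:1px solid #d8e6f3;
--         text-align:center;
--         box-shadow:0 2px 8px rgba(0,0,0,0.05);
--     """
--
--     return f"""
--     <div style="display:grid; grid-template-columns:repeat(4,1fr); gap:14px; margin-bottom:14px;">
--         <div style="{card}">
--             <div style="font-size:30px;font-weight:800;color:#174f84;">{total_assets}</div>
--             <div style="font-size:13px;color:#55708d;">Total Assets</div>
--         </div>
--         <div style="{card}">
--             <div style="font-size:30px;font-weight:800;color:#174f84;">{unmanaged_assets}</div>
--             <div style="font-size:13px;color:#55708d;">Unmanaged</div>
--         </div>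
--         <div style="{card}">
--             <div style="font-size:30px;font-weight:800;color:#174f84;">{unknown_assets}</div>
--             <div style="font-size:13px;color:#55708d;">Unknown / Unattributed</div>
--         </div>
--         <div style="{card}">
--             <div style="font-size:30px;font-weight:800;color:#174f84;">{high_risk_assets}</div>
--             <div style="font-size:13px;color:#55708d;">High / Critical Risk</div>
--         </div>
--     </div>
--     """
-- ===== Notes on version B (the rewrite author's own statement) =====
-- stated objective: alternative
-- what changed: B classifies each device into a list of category tags and builds one histogram dict over the flattened tag stream (Counter-style), reading the three counts out of the dict, instead of A's three independent counting passes with per-metric predicates.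
import Mathlib
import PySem

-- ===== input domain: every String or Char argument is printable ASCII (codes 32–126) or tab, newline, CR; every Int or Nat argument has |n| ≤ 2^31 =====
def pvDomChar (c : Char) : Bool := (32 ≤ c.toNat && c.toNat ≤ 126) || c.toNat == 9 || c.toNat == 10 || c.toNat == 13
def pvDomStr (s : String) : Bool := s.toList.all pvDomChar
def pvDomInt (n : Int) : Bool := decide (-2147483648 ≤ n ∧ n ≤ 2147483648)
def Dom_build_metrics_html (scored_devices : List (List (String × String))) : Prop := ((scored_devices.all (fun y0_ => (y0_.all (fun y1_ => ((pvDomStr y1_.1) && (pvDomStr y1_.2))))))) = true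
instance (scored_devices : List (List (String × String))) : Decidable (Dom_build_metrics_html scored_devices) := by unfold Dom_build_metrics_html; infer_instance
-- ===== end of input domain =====

-- B classifies each device into a list of category tags and counts them with one histogram dict
-- instead of A's three separate counting passes (objective: alternative; return value identical).
-- ===== PORT A =====
def pvP0 : String := "\n    <div style=\"display:grid; grid-template-columns:repeat(4,1fr); gap:14px; margin-bottom:14px;\">\n        <div style=\"\n        background:white;\n        border-radius:16px;\n        padding:18px;\n        border:1px solid #d8e6f3;\n        text-align:center;\n        box-shadow:0 2px 8px rgba(0,0,0,0.05);\n    \">\n            <div style=\"font-size:30px;font-weight:800;color:#174f84;\">"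
def pvP1 : String := "</div>\n            <div style=\"font-size:13px;color:#55708d;\">Total Assets</div>\n        </div>\n        <div style=\"\n        background:white;\n        border-radius:16px;\n        padding:18px;\n        border:1px solid #d8e6f3;\n        text-align:center;\n        box-shadow:0 2px 8px rgba(0,0,0,0.05);\n    \">\n            <div style=\"font-size:30px;font-weight:800;color:#174f84;\">"
def pvP2 : String := "</div>\n            <div style=\"font-size:13px;color:#55708d;\">Unmanaged</div>\n        </div>\n        <div style=\"\n        background:white;\n        border-radius:16px;\n        padding:18px;\n        border:1px solid #d8e6f3;\n        text-align:center;\n        box-shadow:0 2px 8px rgba(0,0,0,0.05);\n    \">\n            <div style=\"font-size:30px;font-weight:800;color:#174f84;\">"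
def pvP3 : String := "</div>\n            <div style=\"font-size:13px;color:#55708d;\">Unknown / Unattributed</div>\n        </div>\n        <div style=\"\n        background:white;\n        border-radius:16px;\n        padding:18px;\n        border:1px solid #d8e6f3;\n        text-align:center;\n        box-shadow:0 2px 8px rgba(0,0,0,0.05);\n    \">\n            <div style=\"font-size:30px;font-weight:800;color:#174f84;\">"
def pvP4 : String := "</div>\n            <div style=\"font-size:13px;color:#55708d;\">High / Critical Risk</div>\n        </div>\n    </div>\n    "

def pvGet (d : List (String × String)) (k : String) : String :=
  match d.find? (fun p => p.1 == k) with
  | some p => p.2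
  | none => ""

def pvIsUnmanaged (d : List (String × String)) : Bool :=
  PySem.Str.lower (pvGet d "managed") == "no"
def pvIsUnknown (d : List (String × String)) : Bool :=
  PySem.Str.lower (pvGet d "asset_type") == "unknown asset" || PySem.Str.lower (pvGet d "owner") == "unknown"
def pvIsHighRisk (d : List (String × String)) : Bool :=
  pvGet d "risk_level" == "High" || pvGet d "risk_level" == "Critical"

def pvRender (total unmanaged unknown high : Int) : String :=
  pvP0 ++ PySem.Int.toStr total ++ pvP1 ++ PySem.Int.toStr unmanaged ++
    pvP2 ++ PySem.Int.toStr unknown ++ pvP3 ++ PySem.Int.toStr high ++ pvP4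

def build_metrics_html (scored_devices : List (List (String × String))) : String :=
  let total_assets : Int := scored_devices.length
  let unmanaged_assets : Int :=
    scored_devices.foldl (fun acc d => if pvIsUnmanaged d then acc + 1 else acc) 0
  let unknown_assets : Int :=
    scored_devices.foldl (fun acc d => if pvIsUnknown d then acc + 1 else acc) 0
  let high_risk_assets : Int :=
    scored_devices.foldl (fun acc d => if pvIsHighRisk d then acc + 1 else acc) 0
  pvRender total_assets unmanaged_assets unknown_assets high_risk_assets

-- ===== PORT B =====
-- _tags(d): the list of category tags a device contributes to the histogram
def pvTags (d : List (String × String)) : List String :=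
  let t0 : List String := []
  let t1 := if pvIsUnmanaged d then t0 ++ ["unmanaged"] else t0
  let t2 := if pvIsUnknown d then t1 ++ ["unknown"] else t1
  if pvIsHighRisk d then t2 ++ ["high_risk"] else t2

def build_metrics_html_alt (scored_devices : List (List (String × String))) : String :=
  let counts : PySem.Dict String Int :=
    scored_devices.foldl
      (fun cnt d => (pvTags d).foldl (fun c t => c.insert t (c.getD t 0 + 1)) cnt)
      PySem.Dict.empty
  let total_assets : Int := scored_devices.length
  pvRender total_assets (counts.getD "unmanaged" 0) (counts.getD "unknown" 0)
    (counts.getD "high_risk" 0)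

-- ===== PRECONDITION & SPEC =====
def Spec_build_metrics_html (scored_devices : List (List (String × String))) (out : String) : Prop := out = build_metrics_html_alt scored_devices
instance (scored_devices : List (List (String × String))) (out : String) : Decidable (Spec_build_metrics_html scored_devices out) := by unfold Spec_build_metrics_html; infer_instance

-- ===== CLAIM (what is proved, stated in full; the proofs are below) =====
def Claim_equal_build_metrics_html : Prop := ∀ (scored_devices : List (List (String × String))), Dom_build_metrics_html scored_devices → Spec_build_metrics_html scored_devices (build_metrics_html scored_devices)

-- ===== LEMMAS AND PROOFS =====
-- A's counting fold equals an offset plus countP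
theorem pvFoldA_countP (p : List (String × String) → Bool)
    (xs : List (List (String × String))) :
    ∀ a : Int, xs.foldl (fun acc d => if p d then acc + 1 else acc) a
      = a + (xs.countP p : Int) := by
  induction xs with
  | nil => intro a; simp
  | cons d xs ih =>
    intro a
    simp only [List.foldl_cons, List.countP_cons, ih]
    by_cases h : p d <;> simp [h] <;> ring

-- B's histogram at key `tag` grows by the count of `tag` among the device's tags
theorem pvFoldB_getD (tag : String) (p : List (String × String) → Bool)
    (hp : ∀ d, (pvTags d).count tag = if p d then 1 else 0)
    (xs : List (List (String × String))) :
    ∀ c : PySem.Dict String Int,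
      (xs.foldl (fun cnt d => (pvTags d).foldl (fun c t => c.insert t (c.getD t 0 + 1)) cnt) c).getD tag 0
        = c.getD tag 0 + (xs.countP p : Int) := by
  induction xs with
  | nil => intro c; simp
  | cons d xs ih =>
    intro c
    simp only [List.foldl_cons, List.countP_cons, ih,
      PySem.Dict.getD_foldl_insert_add_one, hp d]
    by_cases h : p d <;> simp [h] <;> ring

theorem pvTags_count_unmanaged (d : List (String × String)) :
    (pvTags d).count "unmanaged" = if pvIsUnmanaged d then 1 else 0 := by
  unfold pvTags; split_ifs <;> simp_all

theorem pvTags_count_unknown (d : List (String × String)) :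
    (pvTags d).count "unknown" = if pvIsUnknown d then 1 else 0 := by
  unfold pvTags; split_ifs <;> simp_all

theorem pvTags_count_high (d : List (String × String)) :
    (pvTags d).count "high_risk" = if pvIsHighRisk d then 1 else 0 := by
  unfold pvTags; split_ifs <;> simp_all

-- ===== VERDICT (by name: the statement is the Claim_ definition above) =====
theorem build_metrics_html_spec : Claim_equal_build_metrics_html := by
  intro sd _
  show build_metrics_html sd = build_metrics_html_alt sd
  simp only [build_metrics_html, build_metrics_html_alt,
    pvFoldA_countP,
    pvFoldB_getD "unmanaged" pvIsUnmanaged pvTags_count_unmanaged,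
    pvFoldB_getD "unknown" pvIsUnknown pvTags_count_unknown,
    pvFoldB_getD "high_risk" pvIsHighRisk pvTags_count_high,
    PySem.Dict.getD_empty]
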